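-- pv_equiv track=rewrite | github.com/lrnselfreliance/wrolpi | wrolpi/files/lib.py | _extract_candidate_suffixes
-- ===== SOURCE A (Python) =====
-- from typing import Callable, List, Tuple, Union, Dict, Generator, Iterable, Set
--
-- def _extract_candidate_suffixes(name_lower: str) -> List[str]:
--     """Extract potential suffixes from filename (last 1, 2, 3 dot-parts).
--
--     Returns suffixes in order from shortest to longest.
--     """
--     parts = name_lower.rsplit('.', 3)
--     if len(parts) == 1:
--         return []
--     candidates = []
--     append_candidate = candidates.append
--     suffix = ''
--     for i in range(len(parts) - 1, 0, -1):
--         suffix = '.' + parts[i] + suffix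
--         append_candidate(suffix)
--     return candidates
-- ===== SOURCE B (Python) =====
-- def _extract_candidate_suffixes(name_lower: str):
--     """Scan from the right with rfind instead of rsplit+rebuild."""
--     candidates = []
--     idx = len(name_lower)
--     for _ in range(3):
--         dot = name_lower.rfind('.', 0, idx)
--         if dot == -1:
--             break
--         candidates.append(name_lower[dot:])
--         idx = dot
--     return candidates
-- ===== Notes on version B (the rewrite author's own statement) =====
-- stated objective: idiomatic
-- what changed: B scans the filename from the right with rfind and slices each suffix directly from the original string (at most 3 iterations), instead of rsplit with maxsplit 3 followed by a loop that re-concatenates the parts back into suffixes.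
import Mathlib
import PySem

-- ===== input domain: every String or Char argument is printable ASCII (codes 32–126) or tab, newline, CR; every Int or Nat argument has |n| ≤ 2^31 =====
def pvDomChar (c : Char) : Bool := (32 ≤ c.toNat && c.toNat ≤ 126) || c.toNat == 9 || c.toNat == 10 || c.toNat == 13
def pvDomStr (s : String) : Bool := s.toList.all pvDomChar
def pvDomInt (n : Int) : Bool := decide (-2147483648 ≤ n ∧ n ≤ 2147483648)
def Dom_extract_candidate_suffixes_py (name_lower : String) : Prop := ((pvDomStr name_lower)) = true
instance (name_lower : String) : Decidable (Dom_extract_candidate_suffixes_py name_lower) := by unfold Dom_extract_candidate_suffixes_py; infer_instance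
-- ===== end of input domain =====

-- B replaces rsplit-with-maxsplit-3 plus a rebuild loop by a right-to-left rfind scan that slices suffixes directly (idiomatic; same cost).

-- ===== PORT A =====
-- index of the LAST '.' in a character list (none if there is no dot) — the cut point of one rsplit step
def pvLastDot : List Char → Option Nat
  | [] => none
  | c :: t =>
    match pvLastDot t with
    | some i => some (i + 1)
    | none => if c = '.' then some 0 else none

-- lemma cited by pvRsplitDot's termination proof
theorem pvLastDot_lt {t : List Char} {d : Nat} (h : pvLastDot t = some d) : d < t.length := by
  induction t generalizing d with
  | nil => simp [pvLastDot] at h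
  | cons c t ih =>
    simp only [pvLastDot] at h
    cases hh : pvLastDot t with
    | some i =>
      rw [hh] at h; simp at h
      have := ih hh
      simp only [List.length_cons]; omega
    | none =>
      rw [hh] at h
      by_cases hc : c = '.'
      · simp [hc] at h; simp [← h]
      · simp [hc] at h

-- hand port of name_lower.rsplit(dot, maxsplit): cut at the last dot, recurse on the left part
-- (exact: Python rsplit cuts at the rightmost separators first, at most maxsplit cuts)
def pvRsplitDot (s : List Char) : Nat → List (List Char)
  | 0 => [s]
  | m + 1 =>
    match h : pvLastDot s with
    | none => [s]
    | some d => pvRsplitDot (s.take d) m ++ [s.drop (d + 1)]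
termination_by m => (s.length, m)
decreasing_by
  have h1 := pvLastDot_lt h
  have h2 : (s.take d).length < s.length := by simp; omega
  exact Prod.Lex.left _ _ h2

-- A's loop 'for i in range(len(parts)-1, 0, -1)' as structural recursion over the REVERSED
-- parts list (same order, same suffix accumulator and growing candidates list); stops before parts[0]
def pvLoopA : List (List Char) → List Char → List (List Char)
  | [], _ => []
  | [_], _ => []
  | p :: q :: rest, suffix =>
    let suf := '.' :: p ++ suffix
    suf :: pvLoopA (q :: rest) suf

def extract_candidate_suffixes_py (name_lower : String) : List String :=
  if (pvRsplitDot name_lower.toList 3).length = 1 then []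
  else (pvLoopA (pvRsplitDot name_lower.toList 3).reverse []).map (fun l => String.ofList l)

-- ===== PORT B =====
-- B's loop: at most `fuel` times, dot = name_lower.rfind(dot-char, 0, idx); break on -1,
-- else append name_lower[dot:] and continue with idx = dot
def pvLoopB (s : List Char) : Nat → Nat → List (List Char)
  | _, 0 => []
  | idx, k + 1 =>
    let dot := PySem.Chars.rfindFrom s ['.'] 0 (some (idx : Int))
    if dot = -1 then []
    else s.drop dot.toNat :: pvLoopB s dot.toNat k

def extract_candidate_suffixes_py_alt (name_lower : String) : List String :=
  (pvLoopB name_lower.toList name_lower.toList.length 3).map (fun l => String.ofList l)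

-- ===== PRECONDITION & SPEC =====
def Spec_extract_candidate_suffixes_py (name_lower : String) (out : List String) : Prop := out = extract_candidate_suffixes_py_alt name_lower
instance (name_lower : String) (out : List String) : Decidable (Spec_extract_candidate_suffixes_py name_lower out) := by unfold Spec_extract_candidate_suffixes_py; infer_instance

-- ===== CLAIM (what is proved, stated in full; the proofs are below) =====
def Claim_equal_extract_candidate_suffixes_py : Prop := ∀ (name_lower : String), Dom_extract_candidate_suffixes_py name_lower → Spec_extract_candidate_suffixes_py name_lower (extract_candidate_suffixes_py name_lower)

-- ===== LEMMAS AND PROOFS =====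

theorem pvLastDot_none {t : List Char} (h : pvLastDot t = none) :
    ∀ i : Nat, t[i]? ≠ some '.' := by
  induction t with
  | nil => intro i; simp
  | cons c t ih =>
    simp only [pvLastDot] at h
    cases hh : pvLastDot t with
    | some i => rw [hh] at h; simp at h
    | none =>
      rw [hh] at h
      by_cases hc : c = '.'
      · simp [hc] at h
      · intro i
        cases i with
        | zero => simpa using hc
        | succ j => simpa using ih hh j

theorem pvLastDot_some {t : List Char} {d : Nat} (h : pvLastDot t = some d) :
    t[d]? = some '.' ∧ ∀ i, d < i → t[i]? ≠ some '.' := by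
  induction t generalizing d with
  | nil => simp [pvLastDot] at h
  | cons c t ih =>
    simp only [pvLastDot] at h
    cases hh : pvLastDot t with
    | some i =>
      rw [hh] at h; simp at h
      obtain ⟨h1, h2⟩ := ih hh
      subst h
      constructor
      · simpa using h1
      · intro j hj
        cases j with
        | zero => omega
        | succ j' => simpa using h2 j' (by omega)
    | none =>
      rw [hh] at h
      by_cases hc : c = '.'
      · simp [hc] at h
        subst h
        refine ⟨by simpa using hc, ?_⟩
        intro j hj
        cases j with
        | zero => omega
        | succ j' => simpa using pvLastDot_none hh j'
      · simp [hc] at h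

-- ['.'] is a prefix of t.drop i ⟺ the char at i is '.'
theorem pvPrefix_iff (t : List Char) (i : Nat) :
    ['.'].isPrefixOf (t.drop i) = true ↔ t[i]? = some '.' := by
  rw [List.isPrefixOf_iff_prefix]
  constructor
  · rintro ⟨tail, htail⟩
    have h0 : (t.drop i)[0]? = some '.' := by rw [← htail]; simp
    simpa using h0
  · intro h
    obtain ⟨hlt, hv⟩ := List.getElem?_eq_some_iff.mp h
    rw [List.drop_eq_getElem_cons hlt, hv]
    exact ⟨_, rfl⟩

theorem pvGo_neg (t : List Char) (j : Nat)
    (h : ∀ i, i ≤ j → t[i]? ≠ some '.') :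
    PySem.Chars.rfind.go t ['.'] j = -1 := by
  induction j with
  | zero =>
    simp only [PySem.Chars.rfind.go]
    have hiff := pvPrefix_iff t 0
    rw [List.drop_zero] at hiff
    cases hb : ['.'].isPrefixOf t with
    | true => exact absurd (hiff.mp hb) (h 0 (by omega))
    | false => simp
  | succ j ih =>
    simp only [PySem.Chars.rfind.go]
    cases hb : ['.'].isPrefixOf (t.drop (j + 1)) with
    | true => exact absurd ((pvPrefix_iff t (j + 1)).mp hb) (h (j + 1) (by omega))
    | false =>
      simp only [if_neg Bool.false_ne_true]
      exact ih (fun i hi => h i (by omega))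

theorem pvGo_pos (t : List Char) (j d : Nat)
    (hd : t[d]? = some '.') (hdj : d ≤ j)
    (hmax : ∀ i, d < i → i ≤ j → t[i]? ≠ some '.') :
    PySem.Chars.rfind.go t ['.'] j = (d : Int) := by
  induction j with
  | zero =>
    have hz : d = 0 := by omega
    subst hz
    simp only [PySem.Chars.rfind.go]
    have hiff := pvPrefix_iff t 0
    rw [List.drop_zero] at hiff
    rw [hiff.mpr hd]
    simp
  | succ j ih =>
    simp only [PySem.Chars.rfind.go]
    by_cases hcase : d = j + 1
    · subst hcase
      rw [(pvPrefix_iff t (j + 1)).mpr hd]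
      simp
    · cases hb : ['.'].isPrefixOf (t.drop (j + 1)) with
      | true =>
        exact absurd ((pvPrefix_iff t (j + 1)).mp hb)
          (hmax (j + 1) (by omega) (by omega))
      | false =>
        simp only [if_neg Bool.false_ne_true]
        exact ih (by omega) (fun i h1 h2 => hmax i h1 (by omega))

theorem pvRfind_none {t : List Char} (h : pvLastDot t = none) :
    PySem.Chars.rfind t ['.'] = -1 := by
  unfold PySem.Chars.rfind
  exact pvGo_neg t t.length (fun i _ => pvLastDot_none h i)

theorem pvRfind_some {t : List Char} {d : Nat} (h : pvLastDot t = some d) :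
    PySem.Chars.rfind t ['.'] = (d : Int) := by
  unfold PySem.Chars.rfind
  obtain ⟨h1, h2⟩ := pvLastDot_some h
  exact pvGo_pos t t.length d h1 (le_of_lt (pvLastDot_lt h)) (fun i hi _ => h2 i hi)

-- rfind of the dot char with bounds (0, idx) on s is rfind on s.take idx when idx ≤ len(s)
theorem pvRfindFrom_eq (s : List Char) (idx : Nat) (h : idx ≤ s.length) :
    PySem.Chars.rfindFrom s ['.'] 0 (some (idx : Int)) = PySem.Chars.rfind (s.take idx) ['.'] := by
  have h1 : ¬ ((s.length : Int) < (idx : Int)) := by exact_mod_cast not_lt.mpr h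
  have h2 : ¬ ((idx : Int) < 0) := by omega
  unfold PySem.Chars.rfindFrom
  simp only [h1, h2, if_false, Int.toNat_natCast, Int.toNat_zero, List.drop_zero,
    lt_self_iff_false, zero_add]
  split
  · next hr => rw [hr]
  · rfl

theorem pvRsplitDot_ne_nil (t : List Char) (m : Nat) : pvRsplitDot t m ≠ [] := by
  cases m with
  | zero => simp [pvRsplitDot]
  | succ m =>
    unfold pvRsplitDot
    cases h : pvLastDot t <;> simp

-- main invariant: B's scan from position idx equals A's rebuild loop over rsplit of s.take idx,
-- with the already-emitted suffix s.drop idx as accumulator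
theorem pvKey (k : Nat) : ∀ (s : List Char) (idx : Nat), idx ≤ s.length →
    pvLoopB s idx k = pvLoopA (pvRsplitDot (s.take idx) k).reverse (s.drop idx) := by
  induction k with
  | zero => intro s idx _; simp [pvLoopB, pvRsplitDot, pvLoopA]
  | succ k ih =>
    intro s idx hidx
    have hlen : (s.take idx).length = idx := by simp; omega
    unfold pvLoopB
    cases h : pvLastDot (s.take idx) with
    | none =>
      rw [pvRfindFrom_eq s idx hidx, pvRfind_none h]
      unfold pvRsplitDot
      rw [h]
      simp [pvLoopA]
    | some d =>
      have hd : d < idx := by have := pvLastDot_lt h; omega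
      rw [pvRfindFrom_eq s idx hidx, pvRfind_some h]
      rw [if_neg (by omega : ¬ ((d : Int) = -1))]
      simp only [Int.toNat_natCast]
      unfold pvRsplitDot
      rw [h, List.reverse_append, List.reverse_singleton, List.singleton_append]
      obtain ⟨p, rest, hpr⟩ : ∃ p rest, (pvRsplitDot ((s.take idx).take d) k).reverse = p :: rest := by
        cases hrev : (pvRsplitDot ((s.take idx).take d) k).reverse with
        | nil => exact absurd (by simpa using hrev) (pvRsplitDot_ne_nil _ _)
        | cons p rest => exact ⟨p, rest, rfl⟩
      rw [hpr]
      have hdot : (s.take idx)[d]? = some '.' := (pvLastDot_some h).1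
      have hdot' : s[d]? = some '.' := by
        rw [List.getElem?_take] at hdot
        simpa [hd] using hdot
      obtain ⟨hdlt, hval⟩ := List.getElem?_eq_some_iff.mp hdot'
      have hsuf : ('.' :: (s.take idx).drop (d + 1)) ++ s.drop idx = s.drop d := by
        have e1 : s.drop d = s[d] :: s.drop (d + 1) := List.drop_eq_getElem_cons hdlt
        have e3 : (s.take idx).drop (d + 1) ++ s.drop idx = s.drop (d + 1) := by
          conv_rhs => rw [show s = s.take idx ++ s.drop idx from (List.take_append_drop idx s).symm]
          rw [List.drop_append]
          rw [show d + 1 - (s.take idx).length = 0 by omega, List.drop_zero]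
        rw [List.cons_append, e3, e1, hval]
      have htt : (s.take idx).take d = s.take d := by rw [List.take_take]; congr 1; omega
      have hih := ih s d (by omega)
      rw [htt] at hpr
      simp only [pvLoopA]
      rw [hsuf, hih, hpr]

-- ===== VERDICT (by name: the statement is the Claim_ definition above) =====
theorem extract_candidate_suffixes_py_spec : Claim_equal_extract_candidate_suffixes_py := by
  intro s _
  unfold Spec_extract_candidate_suffixes_py extract_candidate_suffixes_py extract_candidate_suffixes_py_alt
  rw [pvKey 3 s.toList s.toList.length (le_refl _), List.take_length, List.drop_length]
  split
  · next hlen =>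
    obtain ⟨p, hp⟩ : ∃ p, pvRsplitDot s.toList 3 = [p] := by
      cases hc : pvRsplitDot s.toList 3 with
      | nil => exact absurd hc (pvRsplitDot_ne_nil _ _)
      | cons p rest =>
        cases rest with
        | nil => exact ⟨p, rfl⟩
        | cons q r => rw [hc] at hlen; simp at hlen
    rw [hp]
    simp [pvLoopA]
  · rfl
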